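-- pv_equiv track=rewrite | github.com/sebastian-nunez/2022-archive | Python/HackerRank/DiagonalDifference.py | diagonalDifference
-- ===== SOURCE A (Python) =====
-- def diagonalDifference(arr):
--     # Write your code here
--     n = len(arr)
--     d1 = 0
--     d2 = 0
--
--     for i in range(n):
--         for j in range(n):
--             if i == j:
--                 d1 += arr[i][j]
--
--             if (i + j) == (n - 1):
--                 d2 += arr[i][j]
--
--     return abs(d1 - d2)
-- ===== SOURCE B (Python) =====
-- def diagonalDifference(arr):
--     n = len(arr)
--     d = 0
--     for i, row in enumerate(arr):
--         d += row[i] - row[n - 1 - i]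
--     return abs(d)
-- ===== Notes on version B (the rewrite author's own statement) =====
-- stated objective: faster
-- what changed: Replaces the nested O(n^2) scan over all cells (testing i==j and i+j==n-1) with a single O(n) pass that directly accumulates row[i] - row[n-1-i] per row.
import Mathlib
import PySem

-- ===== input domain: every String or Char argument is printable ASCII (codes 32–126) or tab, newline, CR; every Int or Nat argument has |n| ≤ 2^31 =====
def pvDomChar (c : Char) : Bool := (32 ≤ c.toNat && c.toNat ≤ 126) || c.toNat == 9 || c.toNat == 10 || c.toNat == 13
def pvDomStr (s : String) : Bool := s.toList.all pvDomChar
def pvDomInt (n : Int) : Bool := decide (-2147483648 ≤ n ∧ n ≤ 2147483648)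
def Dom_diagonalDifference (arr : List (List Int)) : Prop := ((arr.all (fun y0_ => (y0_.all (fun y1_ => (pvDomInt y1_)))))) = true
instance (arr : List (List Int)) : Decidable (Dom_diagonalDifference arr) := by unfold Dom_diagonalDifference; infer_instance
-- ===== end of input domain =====

-- B replaces A's nested O(n^2) scan of all cells with one pass summing row[i] - row[n-1-i]; faster (asymptotic).


-- ===== PORT A =====
-- arr[i][j] is exact via pyGetD under Pre_ (every row has length ≥ len(arr), so all accesses are in range)
def diagonalDifference (arr : List (List Int)) : Int :=
  let n : Int := arr.length
  let s : Int × Int :=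
    (PySem.List.pyRange 0 n 1).foldl (fun (s : Int × Int) i =>
      (PySem.List.pyRange 0 n 1).foldl (fun (s : Int × Int) j =>
        let s := if i == j then (s.1 + PySem.List.pyGetD (PySem.List.pyGetD arr i []) j 0, s.2) else s
        if i + j == n - 1 then (s.1, s.2 + PySem.List.pyGetD (PySem.List.pyGetD arr i []) j 0) else s) s)
      (0, 0)
  |s.1 - s.2|

-- ===== PORT B =====
-- row[i], row[n-1-i] are exact via pyGetD under Pre_ (in range there)
def diagonalDifference_alt (arr : List (List Int)) : Int :=
  let n : Int := arr.length
  let d : Int :=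
    (PySem.List.enumerate arr 0).foldl
      (fun (d : Int) p => d + PySem.List.pyGetD p.2 p.1 0 - PySem.List.pyGetD p.2 (n - 1 - p.1) 0) 0
  |d|

-- ===== PRECONDITION & SPEC =====
-- Pre_: every row has at least len(arr) entries; on shorter rows Python A (and B) raise IndexError.
def Pre_diagonalDifference (arr : List (List Int)) : Prop :=
  ∀ row ∈ arr, arr.length ≤ row.length
instance (arr : List (List Int)) : Decidable (Pre_diagonalDifference arr) := by
  unfold Pre_diagonalDifference; infer_instance

def pvWitness_diagonalDifference : List (List Int) := [[1, 2, 3], [4, 5, 6], [9, 8, 7]]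

def Spec_diagonalDifference (arr : List (List Int)) (out : Int) : Prop := out = diagonalDifference_alt arr
instance (arr : List (List Int)) (out : Int) : Decidable (Spec_diagonalDifference arr out) := by
  unfold Spec_diagonalDifference; infer_instance

-- ===== CLAIM (what is proved, stated in full; the proofs are below) =====
def Claim_equal_diagonalDifference : Prop := ∀ (arr : List (List Int)), Dom_diagonalDifference arr → Pre_diagonalDifference arr → Spec_diagonalDifference arr (diagonalDifference arr)

-- ===== LEMMAS AND PROOFS =====

-- A's inner loop over j, started at a, adds row[i] to d1 (iff i not yet passed) and row[n-1-i] to d2.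
theorem dd_inner (n i : Int) (row : List Int) (hi0 : 0 ≤ i) (hin : i < n) :
    ∀ (k : Nat) (a : Int) (s : Int × Int), 0 ≤ a → a ≤ n → (n - a).toNat = k →
    (PySem.List.pyRange a n 1).foldl (fun (s : Int × Int) j =>
        let s := if i == j then (s.1 + PySem.List.pyGetD row j 0, s.2) else s
        if i + j == n - 1 then (s.1, s.2 + PySem.List.pyGetD row j 0) else s) s
    = (s.1 + (if a ≤ i then PySem.List.pyGetD row i 0 else 0),
       s.2 + (if a ≤ n - 1 - i then PySem.List.pyGetD row (n - 1 - i) 0 else 0)) := by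
  intro k
  induction k with
  | zero =>
    intro a s ha0 han hk
    have hna : n ≤ a := by omega
    rw [PySem.List.pyRange_one_eq_nil hna]
    simp only [List.foldl_nil]
    rw [if_neg (by omega), if_neg (by omega)]
    simp
  | succ k ih =>
    intro a s ha0 han hk
    have hab : a < n := by omega
    rw [PySem.List.pyRange_one_cons hab, List.foldl_cons,
        ih (a + 1) _ (by omega) (by omega) (by omega)]
    simp only [beq_iff_eq]
    by_cases h1 : i = a
    · subst h1
      by_cases h3 : i + i = n - 1
      · have e : n - 1 - i = i := by omega
        simp [e, h3, show ¬(i + 1 ≤ i) from by omega]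
      · have e2 : (i + 1 ≤ n - 1 - i) ↔ (i ≤ n - 1 - i) := by omega
        simp [h3, e2, show ¬(i + 1 ≤ i) from by omega]
    · have e1 : (a + 1 ≤ i) ↔ (a ≤ i) := by omega
      by_cases h3 : i + a = n - 1
      · have e : n - 1 - i = a := by omega
        simp [h1, h3, e, e1, show ¬(a + 1 ≤ a) from by omega]
      · have e2 : (a + 1 ≤ n - 1 - i) ↔ (a ≤ n - 1 - i) := by omega
        simp [h1, h3, e1, e2]

-- The outer loop: running difference d1 - d2 equals B's single-pass accumulator.
theorem dd_outer (arr : List (List Int)) (n : Int) (hn : n = (arr.length : Int)) :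
    ∀ (l : List Int), (∀ j ∈ l, 0 ≤ j ∧ j < n) → ∀ (s : Int × Int),
    (l.foldl (fun (s : Int × Int) i =>
        (PySem.List.pyRange 0 n 1).foldl (fun (s : Int × Int) j =>
          let s := if i == j then (s.1 + PySem.List.pyGetD (PySem.List.pyGetD arr i []) j 0, s.2) else s
          if i + j == n - 1 then (s.1, s.2 + PySem.List.pyGetD (PySem.List.pyGetD arr i []) j 0) else s) s) s).1
    - (l.foldl (fun (s : Int × Int) i =>
        (PySem.List.pyRange 0 n 1).foldl (fun (s : Int × Int) j =>
          let s := if i == j then (s.1 + PySem.List.pyGetD (PySem.List.pyGetD arr i []) j 0, s.2) else s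
          if i + j == n - 1 then (s.1, s.2 + PySem.List.pyGetD (PySem.List.pyGetD arr i []) j 0) else s) s) s).2
    = l.foldl (fun (d : Int) i =>
        d + PySem.List.pyGetD (PySem.List.pyGetD arr i []) i 0
          - PySem.List.pyGetD (PySem.List.pyGetD arr i []) (n - 1 - i) 0) (s.1 - s.2) := by
  intro l
  induction l with
  | nil => intro _ s; simp
  | cons x xs ih =>
    intro hmem s
    have hx := hmem x (by simp)
    rw [List.foldl_cons, List.foldl_cons]
    rw [dd_inner n x (PySem.List.pyGetD arr x []) hx.1 hx.2 (n - 0).toNat 0 s le_rfl (by omega) rfl]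
    rw [if_pos hx.1, if_pos (by omega)]
    rw [ih (fun j hj => hmem j (by simp [hj]))]
    ring_nf

-- ===== VERDICT (by name: the statement is the Claim_ definition above) =====
theorem diagonalDifference_spec : Claim_equal_diagonalDifference := by
  intro arr _ _
  simp only [Spec_diagonalDifference, diagonalDifference, diagonalDifference_alt]
  rw [PySem.List.enumerate_eq_map_pyRange arr ([] : List Int), List.foldl_map]
  simp only [PySem.List.len_eq]
  rw [dd_outer arr (arr.length : Int) rfl (PySem.List.pyRange 0 (arr.length : Int) 1)
      (fun j hj => by
        have := (PySem.List.mem_pyRange_one).1 hj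
        exact ⟨this.1, this.2⟩) (0, 0)]
  norm_num
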